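-- pv_equiv track=rewrite | github.com/KaikoClanworth1/igb-blender | exporter/mesh_extractor.py | triangles_to_strip
-- ===== SOURCE A (Python) =====
-- def triangles_to_strip(tri_indices):
--     """Convert a triangle list to a triangle strip with degenerate separators.
--
--     InsightViewer/XML2 requires prim_type=4 (TriangleStrip). This function
--     converts flat triangle list indices [a,b,c, d,e,f, ...] into a single
--     triangle strip with degenerate triangles separating each real triangle.
--
--     For each triangle (a,b,c), we emit it as a 3-vertex mini-strip.
--     Between consecutive triangles, we insert degenerate connectors:
--     repeat the last vertex of the previous triangle and the first vertex
--     of the next triangle, plus an extra vertex if needed to fix winding.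
--
--     Strip format:
--         tri 0: a, b, c
--         connector: c, d          (degenerate: c,c,d and c,d,d)
--         tri 1: d, e, f           (even position → winding ok)
--         connector: f, g
--         tri 2: g, h, i
--         ...
--
--     Each triangle at strip position P:
--       - Even P → winding (v0, v1, v2) = normal
--       - Odd P  → winding (v0, v2, v1) = reversed
--
--     After the connector (2 degenerate triangles), the next real triangle
--     starts at an even position, so winding is always correct.
--
--     Args:
--         tri_indices: flat list of triangle list indices [a,b,c, d,e,f, ...]
--
--     Returns:
--         list of int — strip indices with degenerate separators
--     """
--     num_tris = len(tri_indices) // 3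
--     if num_tris == 0:
--         return []
--
--     if num_tris == 1:
--         return list(tri_indices[:3])
--
--     strip = []
--     for t in range(num_tris):
--         a = tri_indices[t * 3]
--         b = tri_indices[t * 3 + 1]
--         c = tri_indices[t * 3 + 2]
--
--         if t == 0:
--             # First triangle — just emit it
--             strip.extend([a, b, c])
--         else:
--             # Insert degenerate connector: repeat last vertex, then first of new tri
--             strip.append(strip[-1])  # repeat last (creates degenerate)
--             strip.append(a)          # first of new tri (creates degenerate)
--
--             # After 2 degenerate indices, we've advanced the strip position by 2.
--             # The current strip position (0-based triangle index in the strip)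
--             # determines winding. We need even position for correct winding.
--             # Current strip length before adding the triangle = len(strip)
--             # Strip position = len(strip) - 2 (the triangle starts at this index)
--             strip_pos = len(strip) - 2  # position of the triangle's first vertex
--             if strip_pos % 2 != 0:
--                 # Odd position — add one more degenerate to fix winding
--                 strip.append(a)
--
--             strip.extend([a, b, c])
--
--     return strip
-- ===== SOURCE B (Python) =====
-- def triangles_to_strip(tri_indices):
--     """Triangle list -> strip: closed-form positional index map.
--
--     Instead of emitting triangles one by one, compute for each OUTPUT
--     position k which input index it reads (the first 3 positions are the
--     seed triangle; thereafter each 6-position block t reads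
--     3t+2, 3t+3, 3t+3, 3t+3, 3t+4, 3t+5), and gather in one comprehension.
--     """
--     n = len(tri_indices) // 3
--     if n == 0:
--         return []
--
--     def src(k):
--         if k < 3:
--             return k
--         t, r = divmod(k - 3, 6)
--         return 3 * t + 2 if r == 0 else 3 * t + 3 + max(r - 3, 0)
--
--     return [tri_indices[src(k)] for k in range(6 * n - 3)]
-- ===== Notes on version B (the rewrite author's own statement) =====
-- stated objective: alternative
-- what changed: B replaces A's stateful forward emission (append-per-triangle with a strip[-1] back-reference and a parity branch) by a closed-form positional map: it computes the output length 6n-3 up front and, for each output position k, derives arithmetically which input index that position reads, gathering the result in a single comprehension over output positions.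
import Mathlib
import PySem

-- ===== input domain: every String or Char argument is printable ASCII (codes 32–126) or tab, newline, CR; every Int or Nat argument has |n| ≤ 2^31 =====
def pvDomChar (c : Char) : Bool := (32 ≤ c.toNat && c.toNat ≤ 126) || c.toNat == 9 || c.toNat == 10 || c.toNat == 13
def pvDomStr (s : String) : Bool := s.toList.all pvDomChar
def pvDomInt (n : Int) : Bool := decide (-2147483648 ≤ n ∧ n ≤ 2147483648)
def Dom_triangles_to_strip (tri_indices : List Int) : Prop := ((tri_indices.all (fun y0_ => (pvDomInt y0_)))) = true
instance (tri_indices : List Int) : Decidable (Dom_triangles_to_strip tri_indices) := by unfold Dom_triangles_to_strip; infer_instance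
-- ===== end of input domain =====

-- B replaces A's stateful emission loop (strip[-1] back-reference + parity branch) by a
-- closed-form positional map: one comprehension over output positions with an arithmetic
-- source-index function.

-- ===== PORT A =====
-- loop body of A's 'for t in range(num_tris)'; indices are always in range for the
-- reachable t (0 ≤ t < len//3), so pyGetD with default 0 is exact there
def ttsBody (tri_indices : List Int) (strip : List Int) (t : Int) : List Int :=
  let a := PySem.List.pyGetD tri_indices (t * 3) 0
  let b := PySem.List.pyGetD tri_indices (t * 3 + 1) 0
  let c := PySem.List.pyGetD tri_indices (t * 3 + 2) 0
  if t = 0 then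
    strip ++ [a, b, c]
  else
    let strip := strip ++ [PySem.List.pyGetD strip (-1) 0]   -- strip.append(strip[-1])
    let strip := strip ++ [a]                                 -- strip.append(a)
    let strip_pos : Int := (strip.length : Int) - 2
    let strip := if PySem.Int.mod strip_pos 2 ≠ 0 then strip ++ [a] else strip
    strip ++ [a, b, c]

def triangles_to_strip (tri_indices : List Int) : List Int :=
  let num_tris : Int := PySem.Int.floordiv (tri_indices.length : Int) 3
  if num_tris = 0 then []
  else if num_tris = 1 then PySem.List.slice tri_indices none (some 3)
  else (PySem.List.pyRange 0 num_tris 1).foldl (ttsBody tri_indices) []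

-- ===== PORT B =====
-- Source B's src(k): which input index output position k reads
def ttsSrc (k : Int) : Int :=
  if k < 3 then k
  else if PySem.Int.mod (k - 3) 6 = 0 then 3 * PySem.Int.floordiv (k - 3) 6 + 2
  else 3 * PySem.Int.floordiv (k - 3) 6 + 3 + max (PySem.Int.mod (k - 3) 6 - 3) 0

def triangles_to_strip_alt (tri_indices : List Int) : List Int :=
  let n : Int := PySem.Int.floordiv (tri_indices.length : Int) 3
  if n = 0 then []
  else (PySem.List.pyRange 0 (6 * n - 3) 1).map
    (fun k => PySem.List.pyGetD tri_indices (ttsSrc k) 0)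

-- ===== PRECONDITION & SPEC =====
def Spec_triangles_to_strip (tri_indices : List Int) (out : List Int) : Prop := out = triangles_to_strip_alt tri_indices
instance (tri_indices : List Int) (out : List Int) : Decidable (Spec_triangles_to_strip tri_indices out) := by unfold Spec_triangles_to_strip; infer_instance

-- ===== CLAIM (what is proved, stated in full; the proofs are below) =====
def Claim_equal_triangles_to_strip : Prop := ∀ (tri_indices : List Int), Dom_triangles_to_strip tri_indices → Spec_triangles_to_strip tri_indices (triangles_to_strip tri_indices)

-- ===== LEMMAS AND PROOFS =====

-- proof-only intermediate shape: the strip after triangles 0..k-1 as seed ++ blocks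
def ttsBlock (tri_indices : List Int) (t : Int) : List Int :=
  [PySem.List.pyGetD tri_indices (t * 3 - 1) 0,
   PySem.List.pyGetD tri_indices (t * 3) 0,
   PySem.List.pyGetD tri_indices (t * 3) 0,
   PySem.List.pyGetD tri_indices (t * 3) 0,
   PySem.List.pyGetD tri_indices (t * 3 + 1) 0,
   PySem.List.pyGetD tri_indices (t * 3 + 2) 0]

def ttsE (tri : List Int) (k : Nat) : List Int :=
  PySem.List.slice tri none (some 3) ++
    (PySem.List.pyRange 1 (k : Int) 1).flatMap (ttsBlock tri)

lemma ttsE_one (tri : List Int) (h : 3 ≤ tri.length) :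
    ttsE tri 1 = [PySem.List.pyGetD tri 0 0, PySem.List.pyGetD tri 1 0, PySem.List.pyGetD tri 2 0] := by
  obtain ⟨x0, x1, x2, rest, rfl⟩ : ∃ x0 x1 x2 rest, tri = x0 :: x1 :: x2 :: rest := by
    match tri, h with
    | x0 :: x1 :: x2 :: rest, _ => exact ⟨x0, x1, x2, rest, rfl⟩
  unfold ttsE
  rw [PySem.List.pyRange_one_eq_nil (by norm_num), PySem.List.slice_to _ (by norm_num : (0:Int) ≤ 3)]
  simp only [PySem.List.pyGetD, PySem.List.pyGet?, PySem.List.pyIdx?, List.flatMap_nil, List.append_nil]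
  split_ifs with h1 h2 h3
  · simp
  all_goals omega

lemma ttsE_step (tri : List Int) (n : Nat) (hn : 1 ≤ n) :
    ttsE tri (n + 1) = ttsE tri n ++ ttsBlock tri (n : Int) := by
  unfold ttsE
  have hsplit : PySem.List.pyRange 1 ((n + 1 : Nat) : Int) 1
      = PySem.List.pyRange 1 (n : Int) 1 ++ [(n : Int)] := by
    push_cast
    exact PySem.List.pyRange_one_succ_right (by exact_mod_cast hn)
  rw [hsplit, List.flatMap_append]
  simp [List.append_assoc]

lemma ttsE_last (tri : List Int) (k : Nat) (hk : 1 ≤ k) (h : 3 ≤ tri.length) :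
    PySem.List.pyGetD (ttsE tri k) (-1) 0 = PySem.List.pyGetD tri ((k : Int) * 3 - 1) 0 := by
  induction k with
  | zero => omega
  | succ n ih =>
    rcases Nat.lt_or_ge n 1 with hn | hn
    · interval_cases n
      rw [ttsE_one tri h]
      have h2 : ((1 : Nat) : Int) * 3 - 1 = ((2 : Nat) : Int) := by norm_num
      rw [h2, PySem.List.pyGetD_natCast]
      rw [show ([PySem.List.pyGetD tri 0 0, PySem.List.pyGetD tri 1 0, PySem.List.pyGetD tri 2 0] : List Int)
            = [PySem.List.pyGetD tri 0 0, PySem.List.pyGetD tri 1 0] ++ [PySem.List.pyGetD tri 2 0] from rfl,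
          PySem.List.pyGetD_neg_one_append_singleton]
      rw [show ((2:Int)) = ((2:Nat):Int) by norm_num, PySem.List.pyGetD_natCast]
    · rw [ttsE_step tri n hn]
      rw [show ttsBlock tri (n : Int)
            = [PySem.List.pyGetD tri ((n : Int) * 3 - 1) 0,
               PySem.List.pyGetD tri ((n : Int) * 3) 0,
               PySem.List.pyGetD tri ((n : Int) * 3) 0,
               PySem.List.pyGetD tri ((n : Int) * 3) 0,
               PySem.List.pyGetD tri ((n : Int) * 3 + 1) 0] ++
              [PySem.List.pyGetD tri ((n : Int) * 3 + 2) 0] from rfl,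
          ← List.append_assoc, PySem.List.pyGetD_neg_one_append_singleton]
      congr 1
      push_cast
      ring

lemma ttsE_length_odd (tri : List Int) (k : Nat) (_hk : 1 ≤ k) (h : 3 ≤ tri.length) :
    (ttsE tri k).length % 2 = 1 := by
  have hlen : (ttsE tri k).length = 3 + 6 * (k - 1) := by
    unfold ttsE
    rw [List.length_append]
    have h1 : (PySem.List.slice tri none (some 3)).length = 3 := by
      rw [PySem.List.slice_to _ (by norm_num : (0:Int) ≤ 3)]
      simp [List.length_take]
      omega
    have h2 : ((PySem.List.pyRange 1 (k : Int) 1).flatMap (ttsBlock tri)).length = 6 * (k - 1) := by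
      rw [List.length_flatMap]
      have : ∀ t ∈ PySem.List.pyRange 1 (k : Int) 1, (ttsBlock tri t).length = 6 := by
        intro t _; rfl
      rw [List.map_congr_left this]
      simp [PySem.List.length_pyRange_one]
      omega
    omega
  omega

-- A's loop produces the seed ++ blocks shape
lemma tts_loop (tri : List Int) (k : Nat) (hk : 1 ≤ k) (h : 3 ≤ tri.length) :
    (PySem.List.pyRange 0 (k : Int) 1).foldl (ttsBody tri) [] = ttsE tri k := by
  induction k with
  | zero => omega
  | succ n ih =>
    rcases Nat.lt_or_ge n 1 with hn | hn
    · interval_cases n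
      rw [show ((1 : Nat) : Int) = 1 by norm_num,
          show PySem.List.pyRange 0 1 1 = [0] from PySem.List.pyRange_one_singleton 0]
      rw [ttsE_one tri h]
      simp [ttsBody]
    · have hsplit : PySem.List.pyRange 0 ((n + 1 : Nat) : Int) 1
          = PySem.List.pyRange 0 (n : Int) 1 ++ [(n : Int)] := by
        push_cast
        exact PySem.List.pyRange_one_succ_right (by exact_mod_cast Nat.zero_le n)
      rw [hsplit, List.foldl_append, ih hn]
      simp only [List.foldl_cons, List.foldl_nil]
      have hne : (n : Int) ≠ 0 := by exact_mod_cast Nat.one_le_iff_ne_zero.mp hn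
      have hlast := ttsE_last tri n hn h
      have hodd := ttsE_length_odd tri n hn h
      unfold ttsBody
      rw [if_neg hne]
      show ((if PySem.Int.mod ((((ttsE tri n ++ [PySem.List.pyGetD (ttsE tri n) (-1) 0]) ++ [PySem.List.pyGetD tri ((n:Int) * 3) 0]).length : Int) - 2) 2 ≠ 0
              then ((ttsE tri n ++ [PySem.List.pyGetD (ttsE tri n) (-1) 0]) ++ [PySem.List.pyGetD tri ((n:Int) * 3) 0]) ++ [PySem.List.pyGetD tri ((n:Int) * 3) 0]
              else ((ttsE tri n ++ [PySem.List.pyGetD (ttsE tri n) (-1) 0]) ++ [PySem.List.pyGetD tri ((n:Int) * 3) 0]))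
            ++ [PySem.List.pyGetD tri ((n:Int) * 3) 0, PySem.List.pyGetD tri ((n:Int) * 3 + 1) 0, PySem.List.pyGetD tri ((n:Int) * 3 + 2) 0])
          = ttsE tri (n + 1)
      have hcond : PySem.Int.mod ((((ttsE tri n ++ [PySem.List.pyGetD (ttsE tri n) (-1) 0]) ++ [PySem.List.pyGetD tri ((n:Int) * 3) 0]).length : Int) - 2) 2 ≠ 0 := by
        have hlen2 : ((((ttsE tri n ++ [PySem.List.pyGetD (ttsE tri n) (-1) 0]) ++ [PySem.List.pyGetD tri ((n:Int) * 3) 0]).length : Int) - 2)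
            = ((ttsE tri n).length : Int) := by simp
        rw [hlen2, show ((2:Int)) = ((2:Nat):Int) by norm_num, PySem.Int.mod_natCast, hodd]
        norm_num
      rw [if_pos hcond, hlast, ttsE_step tri n hn]
      simp [ttsBlock, List.append_assoc]

-- values of B's source-index function on a block (m ≥ 1 is the triangle number)
lemma ttsSrc_m0 (m : Int) (hm : 1 ≤ m) : ttsSrc (6*m-3) = 3*m-1 := by
  unfold ttsSrc
  rw [if_neg (by omega), PySem.Int.mod_eq_emod_of_pos (by norm_num), PySem.Int.floordiv_eq_ediv_of_pos (by norm_num)]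
  rw [if_pos (by omega : (6*m-3-3) % 6 = 0), show (6*m-3-3) / 6 = m-1 by omega]
  ring

lemma ttsSrc_m1 (m : Int) (hm : 1 ≤ m) : ttsSrc (6*m-2) = 3*m := by
  unfold ttsSrc
  rw [if_neg (by omega), PySem.Int.mod_eq_emod_of_pos (by norm_num), PySem.Int.floordiv_eq_ediv_of_pos (by norm_num)]
  rw [if_neg (by omega : ¬ (6*m-2-3) % 6 = 0), show (6*m-2-3) / 6 = m-1 by omega,
      show (6*m-2-3) % 6 = 1 by omega]
  norm_num
  ring

lemma ttsSrc_m2 (m : Int) (hm : 1 ≤ m) : ttsSrc (6*m-1) = 3*m := by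
  unfold ttsSrc
  rw [if_neg (by omega), PySem.Int.mod_eq_emod_of_pos (by norm_num), PySem.Int.floordiv_eq_ediv_of_pos (by norm_num)]
  rw [if_neg (by omega : ¬ (6*m-1-3) % 6 = 0), show (6*m-1-3) / 6 = m-1 by omega,
      show (6*m-1-3) % 6 = 2 by omega]
  norm_num
  ring

lemma ttsSrc_m3 (m : Int) (hm : 1 ≤ m) : ttsSrc (6*m) = 3*m := by
  unfold ttsSrc
  rw [if_neg (by omega), PySem.Int.mod_eq_emod_of_pos (by norm_num), PySem.Int.floordiv_eq_ediv_of_pos (by norm_num)]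
  rw [if_neg (by omega : ¬ (6*m-3) % 6 = 0), show (6*m-3) / 6 = m-1 by omega,
      show (6*m-3) % 6 = 3 by omega]
  norm_num
  ring

lemma ttsSrc_m4 (m : Int) (hm : 1 ≤ m) : ttsSrc (6*m+1) = 3*m+1 := by
  unfold ttsSrc
  rw [if_neg (by omega), PySem.Int.mod_eq_emod_of_pos (by norm_num), PySem.Int.floordiv_eq_ediv_of_pos (by norm_num)]
  rw [if_neg (by omega : ¬ (6*m+1-3) % 6 = 0), show (6*m+1-3) / 6 = m-1 by omega,
      show (6*m+1-3) % 6 = 4 by omega]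
  norm_num
  ring

lemma ttsSrc_m5 (m : Int) (hm : 1 ≤ m) : ttsSrc (6*m+2) = 3*m+2 := by
  unfold ttsSrc
  rw [if_neg (by omega), PySem.Int.mod_eq_emod_of_pos (by norm_num), PySem.Int.floordiv_eq_ediv_of_pos (by norm_num)]
  rw [if_neg (by omega : ¬ (6*m+2-3) % 6 = 0), show (6*m+2-3) / 6 = m-1 by omega,
      show (6*m+2-3) % 6 = 5 by omega]
  norm_num
  ring

lemma pyRange_six (a : Int) : PySem.List.pyRange a (a+6) 1 = [a, a+1, a+2, a+3, a+4, a+5] := by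
  rw [PySem.List.pyRange_one, show (a+6-a).toNat = 6 by omega]
  simp [List.range_succ]

-- B's positional map produces the same seed ++ blocks shape
lemma tts_map (tri : List Int) (n : Nat) (hn : 1 ≤ n) (h : 3 ≤ tri.length) :
    (PySem.List.pyRange 0 (6*(n : Int)-3) 1).map (fun k => PySem.List.pyGetD tri (ttsSrc k) 0)
      = ttsE tri n := by
  induction n with
  | zero => omega
  | succ n ih =>
    rcases Nat.lt_or_ge n 1 with hn1 | hn1
    · interval_cases n
      rw [show 6*((1:Nat) : Int)-3 = 0 + 3 by norm_num]
      rw [show PySem.List.pyRange 0 (0+3) 1 = [0, 1, 2] by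
            rw [PySem.List.pyRange_one, show ((0:Int)+3-0).toNat = 3 by omega]
            simp [List.range_succ]]
      rw [ttsE_one tri h]
      simp only [List.map_cons, List.map_nil]
      rw [show ttsSrc 0 = 0 from rfl, show ttsSrc 1 = 1 from rfl, show ttsSrc 2 = 2 from rfl]
    · have hm : (1 : Int) ≤ (n : Int) := by exact_mod_cast hn1
      have hsplit : PySem.List.pyRange 0 (6*((n+1 : Nat) : Int)-3) 1
          = PySem.List.pyRange 0 (6*(n : Int)-3) 1 ++ PySem.List.pyRange (6*(n : Int)-3) ((6*(n : Int)-3)+6) 1 := by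
        rw [show 6*((n+1 : Nat) : Int)-3 = (6*(n : Int)-3)+6 by push_cast; ring]
        exact PySem.List.pyRange_one_append 0 (6*(n : Int)-3) ((6*(n : Int)-3)+6) (by omega) (by omega)
      rw [hsplit, List.map_append, ih hn1, pyRange_six, ttsE_step tri n hn1]
      congr 1
      simp only [List.map_cons, List.map_nil]
      rw [show (6*(n:Int)-3)+1 = 6*(n:Int)-2 by ring, show (6*(n:Int)-3)+2 = 6*(n:Int)-1 by ring,
          show (6*(n:Int)-3)+3 = 6*(n:Int) by ring, show (6*(n:Int)-3)+4 = 6*(n:Int)+1 by ring,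
          show (6*(n:Int)-3)+5 = 6*(n:Int)+2 by ring,
          ttsSrc_m0 _ hm, ttsSrc_m1 _ hm, ttsSrc_m2 _ hm, ttsSrc_m3 _ hm, ttsSrc_m4 _ hm, ttsSrc_m5 _ hm]
      unfold ttsBlock
      ring_nf

-- ===== VERDICT (by name: the statement is the Claim_ definition above) =====
theorem triangles_to_strip_spec : Claim_equal_triangles_to_strip := by
  intro tri _
  unfold Spec_triangles_to_strip triangles_to_strip triangles_to_strip_alt
  have hfd : PySem.Int.floordiv (tri.length : Int) 3 = ((tri.length / 3 : Nat) : Int) := by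
    exact_mod_cast PySem.Int.floordiv_natCast tri.length 3
  rw [hfd]
  set m : Nat := tri.length / 3 with hm
  rcases Nat.lt_or_ge m 1 with h0 | h1
  · interval_cases m
    simp
  · have hlen : 3 ≤ tri.length := by omega
    have hne0 : ((m : Nat) : Int) ≠ 0 := by exact_mod_cast Nat.one_le_iff_ne_zero.mp h1
    rw [if_neg hne0, if_neg hne0]
    rw [tts_map tri m h1 hlen]
    rcases Nat.lt_or_ge m 2 with h2 | h2
    · interval_cases m
      rw [if_pos (by norm_num)]
      unfold ttsE
      rw [show ((1 : Nat) : Int) = 1 by norm_num, PySem.List.pyRange_one_eq_nil le_rfl]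
      simp
    · have hne1 : ((m : Nat) : Int) ≠ 1 := by
        intro hc
        have : m = 1 := by exact_mod_cast hc
        omega
      rw [if_neg hne1]
      exact tts_loop tri m h1 hlen
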